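-- pv_equiv track=rewrite | github.com/DestinEcarma/t-ccd | src/tccd/analysis/analyzer.py | _calculate_false_negatives
-- ===== SOURCE A (Python) =====
-- from typing import Dict, List, Set, Tuple
--
-- def _calculate_false_negatives(algorithm_collisions: List[Tuple],
--                              ground_truth: Set[Tuple]) -> int:
--     """Calculate false negatives efficiently."""
--     detected_lookup = {}
--     for frame, p1, p2 in algorithm_collisions:
--         key = (p1, p2)
--         if key not in detected_lookup:
--             detected_lookup[key] = []
--         detected_lookup[key].append(frame)
--
--     false_negatives = 0
--     for gt_frame_min, gt_frame_max, gt_p1, gt_p2 in ground_truth: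
--         particle_pair = (gt_p1, gt_p2)
--
--         is_detected = False
--         if particle_pair in detected_lookup:
--             for detected_frame in detected_lookup[particle_pair]:
--                 if gt_frame_min <= detected_frame <= gt_frame_max:
--                     is_detected = True
--                     break
--
--         if not is_detected:
--             false_negatives += 1
--
--     return false_negatives
-- ===== SOURCE B (Python) =====
-- def _calculate_false_negatives(algorithm_collisions, ground_truth):
--     """Count ground-truth collisions with no detection inside their frame range:
--     group detections per pair, sort each group once, answer each query by binary search."""
--     frames_by_pair = {}
--     for frame, p1, p2 in algorithm_collisions:
--         frames_by_pair.setdefault((p1, p2), []).append(frame)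
--     sorted_frames = {key: sorted(fs) for key, fs in frames_by_pair.items()}
--
--     def bisect_left(a, x):
--         lo, hi = 0, len(a)
--         while lo < hi:
--             mid = (lo + hi) // 2
--             if a[mid] < x:
--                 lo = mid + 1
--             else:
--                 hi = mid
--         return lo
--
--     false_negatives = 0
--     for gt_frame_min, gt_frame_max, gt_p1, gt_p2 in ground_truth:
--         fs = sorted_frames.get((gt_p1, gt_p2), [])
--         i = bisect_left(fs, gt_frame_min)
--         if i == len(fs) or fs[i] > gt_frame_max:
--             false_negatives += 1
--     return false_negatives
-- ===== Notes on version B (the rewrite author's own statement) =====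
-- stated objective: faster
-- what changed: B sorts each particle pair's detected-frame list once and answers each ground-truth query with a binary search for the first frame >= gt_frame_min, instead of A's linear scan of the pair's whole frame list per query.
import Mathlib
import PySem

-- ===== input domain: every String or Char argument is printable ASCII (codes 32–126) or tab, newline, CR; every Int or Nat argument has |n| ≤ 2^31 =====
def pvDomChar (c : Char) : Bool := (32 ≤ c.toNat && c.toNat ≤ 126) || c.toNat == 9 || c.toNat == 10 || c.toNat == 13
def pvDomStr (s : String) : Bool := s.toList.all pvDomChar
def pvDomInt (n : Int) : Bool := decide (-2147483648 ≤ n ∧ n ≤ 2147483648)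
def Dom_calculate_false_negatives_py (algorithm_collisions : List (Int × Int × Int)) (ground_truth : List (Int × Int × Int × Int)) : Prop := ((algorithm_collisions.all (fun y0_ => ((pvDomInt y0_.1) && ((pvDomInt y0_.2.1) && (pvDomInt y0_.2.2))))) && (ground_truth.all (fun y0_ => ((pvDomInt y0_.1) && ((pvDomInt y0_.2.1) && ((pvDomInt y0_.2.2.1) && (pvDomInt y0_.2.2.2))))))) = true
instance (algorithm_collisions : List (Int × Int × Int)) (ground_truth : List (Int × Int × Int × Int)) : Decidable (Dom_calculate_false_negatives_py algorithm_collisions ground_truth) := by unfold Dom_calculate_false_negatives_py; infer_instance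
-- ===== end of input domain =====

-- B replaces A's per-query linear scan of each pair's frame list by sorting each
-- group once and answering each ground-truth query with a binary search.

-- ===== PORT A =====
-- A's dict-building loop: `if key not in d: d[key] = []` then `d[key].append(frame)`.
def pvBuildA (algorithm_collisions : List (Int × Int × Int)) : PySem.Dict (Int × Int) (List Int) :=
  algorithm_collisions.foldl
    (fun d t =>
      let key := (t.2.1, t.2.2)
      let d1 := if d.contains key then d else d.insert key []
      d1.insert key (d1.getD key [] ++ [t.1]))
    PySem.Dict.empty

-- A's inner `for detected_frame in …: if gt_frame_min <= detected_frame <= gt_frame_max: break` loop.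
def pvScanFrames (mn mx : Int) : List Int → Bool
  | [] => false
  | f :: rest => if mn ≤ f ∧ f ≤ mx then true else pvScanFrames mn mx rest

def calculate_false_negatives_py (algorithm_collisions : List (Int × Int × Int)) (ground_truth : List (Int × Int × Int × Int)) : Int :=
  let detected_lookup := pvBuildA algorithm_collisions
  ground_truth.foldl
    (fun acc t =>
      let particle_pair := (t.2.2.1, t.2.2.2)
      let is_detected :=
        if detected_lookup.contains particle_pair then
          pvScanFrames t.1 t.2.1 (detected_lookup.getD particle_pair [])
        else false
      if !is_detected then acc + 1 else acc)
    0

-- ===== PORT B =====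
-- B's grouping loop: `d.setdefault((p1, p2), []).append(frame)`, i.e. d[k] = d.get(k, []) + [frame] = Dict.modify.
def pvBuildB (algorithm_collisions : List (Int × Int × Int)) : PySem.Dict (Int × Int) (List Int) :=
  algorithm_collisions.foldl
    (fun d t => d.modify (t.2.1, t.2.2) [] (· ++ [t.1]))
    PySem.Dict.empty

-- B's `{key: sorted(fs) for key, fs in frames_by_pair.items()}`.
def pvSortVals (d : PySem.Dict (Int × Int) (List Int)) : PySem.Dict (Int × Int) (List Int) :=
  PySem.Dict.mk (d.items.map (fun p => (p.1, PySem.List.sorted p.2 (fun x => x))))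

-- Source B's hand-written bisect_left (lo/hi halving with mid = (lo+hi)//2) is exactly
-- PySem.List.bisectLeft's loop, step for step; pyGetD is exact here since in the
-- evaluated branch 0 ≤ i < len(fs) (Python's `or` short-circuits; the ∨ matches that value-wise).
def calculate_false_negatives_py_alt (algorithm_collisions : List (Int × Int × Int)) (ground_truth : List (Int × Int × Int × Int)) : Int :=
  let sorted_frames := pvSortVals (pvBuildB algorithm_collisions)
  ground_truth.foldl
    (fun acc t =>
      let fs := sorted_frames.getD (t.2.2.1, t.2.2.2) []
      let i := PySem.List.bisectLeft fs t.1
      if i = fs.length ∨ t.2.1 < PySem.List.pyGetD fs (i : Int) 0 then acc + 1 else acc)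
    0

-- ===== PRECONDITION & SPEC =====
def Spec_calculate_false_negatives_py (algorithm_collisions : List (Int × Int × Int)) (ground_truth : List (Int × Int × Int × Int)) (out : Int) : Prop := out = calculate_false_negatives_py_alt algorithm_collisions ground_truth
instance (algorithm_collisions : List (Int × Int × Int)) (ground_truth : List (Int × Int × Int × Int)) (out : Int) : Decidable (Spec_calculate_false_negatives_py algorithm_collisions ground_truth out) := by unfold Spec_calculate_false_negatives_py; infer_instance

-- ===== CLAIM (what is proved, stated in full; the proofs are below) =====
def Claim_equal_calculate_false_negatives_py : Prop := ∀ (algorithm_collisions : List (Int × Int × Int)) (ground_truth : List (Int × Int × Int × Int)), Dom_calculate_false_negatives_py algorithm_collisions ground_truth → Spec_calculate_false_negatives_py algorithm_collisions ground_truth (calculate_false_negatives_py algorithm_collisions ground_truth)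

-- ===== LEMMAS AND PROOFS =====

-- the frames of all collisions on a given pair, in input order
def pvGroup (cs : List (Int × Int × Int)) (pr : Int × Int) : List Int :=
  (cs.filter (fun t => (t.2.1, t.2.2) == pr)).map (·.1)

lemma pvScanFrames_iff (mn mx : Int) (l : List Int) :
    pvScanFrames mn mx l = true ↔ ∃ f ∈ l, mn ≤ f ∧ f ≤ mx := by
  induction l with
  | nil => simp [pvScanFrames]
  | cons f rest ih =>
      by_cases h : mn ≤ f ∧ f ≤ mx <;> simp [pvScanFrames, h, ih]

lemma pvBuildA_getD_aux (cs : List (Int × Int × Int)) :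
    ∀ (d : PySem.Dict (Int × Int) (List Int)) (pr : Int × Int),
      (cs.foldl (fun d t =>
        let key := (t.2.1, t.2.2)
        let d1 := if d.contains key then d else d.insert key []
        d1.insert key (d1.getD key [] ++ [t.1])) d).getD pr []
      = d.getD pr [] ++ pvGroup cs pr := by
  induction cs with
  | nil => intro d pr; simp [pvGroup]
  | cons t rest ih =>
      intro d pr
      simp only [List.foldl_cons]
      rw [ih]
      by_cases hpr : pr = (t.2.1, t.2.2)
      · subst hpr
        by_cases hc : d.contains (t.2.1, t.2.2)
        · simp only [hc, if_true]
          rw [PySem.Dict.getD_insert_self]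
          simp [pvGroup]
        · simp only [hc, if_false, Bool.false_eq_true]
          rw [PySem.Dict.getD_insert_self, PySem.Dict.getD_insert_self,
              PySem.Dict.getD_of_not_contains _ _ (by simpa using hc)]
          simp [pvGroup]
      · have h2 : ((t.2.1, t.2.2) : Int × Int) ≠ pr := fun h => hpr h.symm
        by_cases hc : d.contains (t.2.1, t.2.2)
        · simp only [hc, if_true]
          rw [PySem.Dict.getD_insert_of_ne _ _ _ hpr]
          simp [pvGroup, h2]
        · simp only [hc, if_false, Bool.false_eq_true]
          rw [PySem.Dict.getD_insert_of_ne _ _ _ hpr,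
              PySem.Dict.getD_insert_of_ne _ _ _ hpr]
          simp [pvGroup, h2]

lemma pvBuildA_getD (cs : List (Int × Int × Int)) (pr : Int × Int) :
    (pvBuildA cs).getD pr [] = pvGroup cs pr := by
  unfold pvBuildA
  rw [pvBuildA_getD_aux]
  simp [PySem.Dict.getD_empty]

lemma pvBuildB_getD (cs : List (Int × Int × Int)) (pr : Int × Int) :
    (pvBuildB cs).getD pr [] = pvGroup cs pr := by
  have h := PySem.Dict.getD_foldl_modify_append
      (cs.map (fun t => ((t.2.1, t.2.2), t.1))) PySem.Dict.empty pr
  rw [List.foldl_map] at h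
  unfold pvBuildB pvGroup
  rw [h]
  simp [List.filter_map, Function.comp_def]

lemma pv_get?_mk_map (l : List ((Int × Int) × List Int)) (pr : Int × Int) :
    (PySem.Dict.mk (l.map (fun p => (p.1, PySem.List.sorted p.2 (fun x => x))))).get? pr
      = ((PySem.Dict.mk l).get? pr).map (fun v => PySem.List.sorted v (fun x => x)) := by
  induction l with
  | nil => simp [PySem.Dict.get?]
  | cons p rest ih =>
      obtain ⟨k, v⟩ := p
      simp only [List.map_cons, PySem.Dict.get?_mk_cons]
      by_cases h : (k == pr) = true <;> simp [h, ih]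

lemma pvSortVals_getD (d : PySem.Dict (Int × Int) (List Int)) (pr : Int × Int) :
    (pvSortVals d).getD pr [] = PySem.List.sorted (d.getD pr []) (fun x => x) := by
  unfold pvSortVals
  rw [PySem.Dict.getD_eq_get?_getD, PySem.Dict.getD_eq_get?_getD, pv_get?_mk_map d.items pr]
  cases h : d.get? pr with
  | none => simp [PySem.List.sorted]
  | some v => simp

-- the binary-search miss condition on the sorted group ↔ no frame in [mn, mx]
lemma pvBisect_miss (l : List Int) (mn mx : Int) :
    (PySem.List.bisectLeft (PySem.List.sorted l (fun x => x)) mn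
        = (PySem.List.sorted l (fun x => x)).length
      ∨ mx < PySem.List.pyGetD (PySem.List.sorted l (fun x => x))
          ((PySem.List.bisectLeft (PySem.List.sorted l (fun x => x)) mn : Nat) : Int) 0)
    ↔ ¬ ∃ f ∈ l, mn ≤ f ∧ f ≤ mx := by
  set fs := PySem.List.sorted l (fun x => x) with hfs
  have hpair : List.Pairwise (fun a b : Int => a ≤ b) fs := by
    simpa using PySem.List.sorted_pairwise l (fun x => x)
  obtain ⟨hle, hlt, hge⟩ := PySem.List.bisectLeft_spec fs mn hpair
  set i := PySem.List.bisectLeft fs mn with hi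
  have hmem : ∀ f : Int, f ∈ l ↔ f ∈ fs := by
    intro f; rw [hfs, PySem.List.mem_sorted]
  constructor
  · rintro (h | h) ⟨f, hf, hmnf, hfmx⟩
    · obtain ⟨j, hj, rfl⟩ := List.getElem_of_mem ((hmem f).1 hf)
      exact absurd hmnf (not_le.2 (hlt j hj (h ▸ hj)))
    · rcases lt_or_ge i fs.length with hilen | hilen
      · have hgd : PySem.List.pyGetD fs ((i : Nat) : Int) 0 = fs[i] := by
          rw [PySem.List.pyGetD_natCast]
          simp [hilen]
        rw [hgd] at h
        obtain ⟨j, hj, rfl⟩ := List.getElem_of_mem ((hmem f).1 hf)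
        rcases lt_or_ge j i with hji | hji
        · exact absurd hmnf (not_le.2 (hlt j hj hji))
        · have : fs[i] ≤ fs[j] := by
            rcases eq_or_lt_of_le hji with rfl | hji'
            · exact le_refl _
            · exact (List.pairwise_iff_getElem.1 hpair) i j hilen hj hji'
          omega
      · have hend : i = fs.length := le_antisymm hle hilen
        obtain ⟨j, hj, rfl⟩ := List.getElem_of_mem ((hmem f).1 hf)
        exact absurd hmnf (not_le.2 (hlt j hj (hend ▸ hj)))
  · intro hno
    by_contra hcon
    push Not at hcon
    obtain ⟨hne, hle2⟩ := hcon
    have hilen : i < fs.length := lt_of_le_of_ne hle hne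
    have hgd : PySem.List.pyGetD fs ((i : Nat) : Int) 0 = fs[i] := by
      rw [PySem.List.pyGetD_natCast]; simp [hilen]
    rw [hgd] at hle2
    exact hno ⟨fs[i], (hmem _).2 (List.getElem_mem hilen),
      hge i hilen (le_refl i), hle2⟩

-- ===== VERDICT (by name: the statement is the Claim_ definition above) =====
theorem calculate_false_negatives_py_spec : Claim_equal_calculate_false_negatives_py := by
  intro cs gt _hdom
  unfold Spec_calculate_false_negatives_py
  unfold calculate_false_negatives_py calculate_false_negatives_py_alt
  simp only []
  apply PySem.List.foldl_congr_mem
  intro acc t _ht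
  set pr : Int × Int := (t.2.2.1, t.2.2.2) with hpr
  rw [pvSortVals_getD, pvBuildB_getD]
  set detA := (if (pvBuildA cs).contains pr then
      pvScanFrames t.1 t.2.1 ((pvBuildA cs).getD pr []) else false) with hdA
  have hdetected : detA = true ↔ ∃ f ∈ pvGroup cs pr, t.1 ≤ f ∧ f ≤ t.2.1 := by
    rw [hdA]
    by_cases hc : (pvBuildA cs).contains pr
    · rw [if_pos hc, pvBuildA_getD, pvScanFrames_iff]
    · rw [if_neg hc]
      have hnil : pvGroup cs pr = [] := by
        rw [← pvBuildA_getD cs pr,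
            PySem.Dict.getD_of_not_contains _ _ (by simpa using hc)]
      simp [hnil]
  have hmiss := pvBisect_miss (pvGroup cs pr) t.1 t.2.1
  by_cases hex : ∃ f ∈ pvGroup cs pr, t.1 ≤ f ∧ f ≤ t.2.1
  · have h1 : detA = true := hdetected.2 hex
    rw [if_neg (by simp [h1]), if_neg (by rw [hmiss]; exact not_not_intro hex)]
  · have h1 : detA = false := by
      cases hb : detA
      · rfl
      · exact absurd (hdetected.1 hb) hex
    rw [if_pos (by simp [h1]), if_pos (hmiss.2 hex)]
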